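-- pv_equiv track=rewrite | github.com/17shashank17/Parallel-Dual-Population-Genetic-Algorithm | raygene.py | crossBreeding
-- ===== SOURCE A (Python) =====
-- def func(x):
--   return x[0]
--
-- def crossBreeding(pop,reserve_pop,fitness,reserve_fitness):
--   breed_pop1=[]
--   breed_pop2=[]
--   for i in range(len(pop)):
--     breed_pop1.append((fitness[i],pop[i]))
--     breed_pop2.append((reserve_fitness[i],reserve_pop[i]))
--
--   breed_pop1.sort(key=func,reverse=True)
--   breed_pop2.sort(key=func,reverse=True)
--   j,k=0,0
--   for i in range(0,len(pop)):
--     if breed_pop1[j][0]>breed_pop2[k][0]: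
--       pop[i]=breed_pop1[j][1]
--       j+=1
--     else:
--       pop[i]=breed_pop2[k][1]
--       k+=1
--
--
--   return pop
-- ===== SOURCE B (Python) =====
-- def crossBreeding(pop, reserve_pop, fitness, reserve_fitness):
--     n = len(pop)
--     combined = [(reserve_fitness[i], reserve_pop[i]) for i in range(n)] \
--              + [(fitness[i], pop[i]) for i in range(n)]
--     combined.sort(key=lambda t: t[0], reverse=True)
--     pop[:] = [ind for _, ind in combined[:n]]
--     return pop
-- ===== Notes on version B (the rewrite author's own statement) =====
-- stated objective: simpler
-- what changed: A sorts the two populations separately and then merges them with two hand-maintained cursors inside an index loop that writes pop[i]; B builds one combined (fitness, individual) list with the reserve entries first, does a single stable reverse sort keyed on fitness, and keeps the top len(pop) individuals (stability makes ties go to the reserve side exactly as A's merge does).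
import Mathlib
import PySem

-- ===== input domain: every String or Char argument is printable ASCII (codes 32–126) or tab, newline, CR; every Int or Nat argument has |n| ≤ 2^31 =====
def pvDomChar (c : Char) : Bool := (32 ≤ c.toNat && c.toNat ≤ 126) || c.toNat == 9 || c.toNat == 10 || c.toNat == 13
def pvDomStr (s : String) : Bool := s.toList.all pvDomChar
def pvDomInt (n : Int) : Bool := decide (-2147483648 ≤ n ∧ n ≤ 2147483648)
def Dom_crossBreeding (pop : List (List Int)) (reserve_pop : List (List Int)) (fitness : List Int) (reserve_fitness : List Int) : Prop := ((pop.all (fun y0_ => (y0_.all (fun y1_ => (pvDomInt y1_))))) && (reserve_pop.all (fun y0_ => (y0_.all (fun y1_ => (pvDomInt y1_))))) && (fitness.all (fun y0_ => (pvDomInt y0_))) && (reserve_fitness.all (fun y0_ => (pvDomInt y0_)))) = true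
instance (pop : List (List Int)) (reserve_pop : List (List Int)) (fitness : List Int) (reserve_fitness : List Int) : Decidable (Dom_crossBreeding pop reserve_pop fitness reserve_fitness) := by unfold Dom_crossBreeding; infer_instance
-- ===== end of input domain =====

-- B replaces A's sort-twice-then-cursor-merge by ONE stable sort of the combined
-- (fitness, individual) list (reserve entries first, so ties go to the reserve side exactly
-- as in A's merge) and takes the top len(pop); objective: simpler.  Both Pythons mutate
-- `pop` in place (A writes pop[i], B assigns pop[:]); the equivalence proved here is about
-- the returned value, which in both is also the final content of `pop`.

-- ===== PORT A =====
-- def func(x): return x[0]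
def pvFunc (x : Int × List Int) : Int := x.1

-- A's first loop: build breed_pop1 / breed_pop2 by appending, i over range(len(pop))
def crossBreedingBuild (pop : List (List Int)) (reserve_pop : List (List Int)) (fitness : List Int) (reserve_fitness : List Int) : List (Int × List Int) × List (Int × List Int) :=
  (PySem.List.pyRange 0 (pop.length : Int) 1).foldl
    (fun (st : List (Int × List Int) × List (Int × List Int)) i =>
      (st.1 ++ [(PySem.List.pyGetD fitness i 0, PySem.List.pyGetD pop i [])],
       st.2 ++ [(PySem.List.pyGetD reserve_fitness i 0, PySem.List.pyGetD reserve_pop i [])]))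
    ([], [])

-- A's second loop: i over range(len(pop)), cursors j,k, assignment to pop[i]
def crossBreedingLoop (b1 b2 : List (Int × List Int)) (n : Nat) (i j k : Nat) (pop : List (List Int)) : List (List Int) :=
  if h : i < n then
    if (PySem.List.pyGetD b1 (j : Int) (0, [])).1 > (PySem.List.pyGetD b2 (k : Int) (0, [])).1 then
      crossBreedingLoop b1 b2 n (i+1) (j+1) k (pop.set i (PySem.List.pyGetD b1 (j : Int) (0, [])).2)
    else
      crossBreedingLoop b1 b2 n (i+1) j (k+1) (pop.set i (PySem.List.pyGetD b2 (k : Int) (0, [])).2)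
  else pop
termination_by n - i
decreasing_by all_goals omega

def crossBreeding (pop : List (List Int)) (reserve_pop : List (List Int)) (fitness : List Int) (reserve_fitness : List Int) : List (List Int) :=
  let bs := crossBreedingBuild pop reserve_pop fitness reserve_fitness
  let b1 := PySem.List.sorted bs.1 pvFunc true
  let b2 := PySem.List.sorted bs.2 pvFunc true
  crossBreedingLoop b1 b2 pop.length 0 0 0 pop

-- ===== PORT B =====
def crossBreeding_alt (pop : List (List Int)) (reserve_pop : List (List Int)) (fitness : List Int) (reserve_fitness : List Int) : List (List Int) :=
  let n : Int := pop.length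
  let combined :=
    (PySem.List.pyRange 0 n 1).map (fun i => (PySem.List.pyGetD reserve_fitness i 0, PySem.List.pyGetD reserve_pop i []))
    ++ (PySem.List.pyRange 0 n 1).map (fun i => (PySem.List.pyGetD fitness i 0, PySem.List.pyGetD pop i []))
  let sortedC := PySem.List.sorted combined (fun t => t.1) true
  (PySem.List.slice sortedC none (some n)).map (fun t => t.2)

-- ===== PRECONDITION & SPEC =====
-- Pre_ excludes exactly the inputs on which Python A raises IndexError: some index i < len(pop)
-- reaching into a shorter reserve_pop / fitness / reserve_fitness (Python B raises there too).
def Pre_crossBreeding (pop : List (List Int)) (reserve_pop : List (List Int)) (fitness : List Int) (reserve_fitness : List Int) : Prop :=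
  pop.length ≤ reserve_pop.length ∧ pop.length ≤ fitness.length ∧ pop.length ≤ reserve_fitness.length
instance (pop : List (List Int)) (reserve_pop : List (List Int)) (fitness : List Int) (reserve_fitness : List Int) : Decidable (Pre_crossBreeding pop reserve_pop fitness reserve_fitness) := by unfold Pre_crossBreeding; infer_instance
def pvWitness_crossBreeding : List (List Int) × List (List Int) × List Int × List Int :=
  ([[1], [2]], [[3], [4]], [5, 1], [4, 4])

def Spec_crossBreeding (pop : List (List Int)) (reserve_pop : List (List Int)) (fitness : List Int) (reserve_fitness : List Int) (out : List (List Int)) : Prop := out = crossBreeding_alt pop reserve_pop fitness reserve_fitness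
instance (pop : List (List Int)) (reserve_pop : List (List Int)) (fitness : List Int) (reserve_fitness : List Int) (out : List (List Int)) : Decidable (Spec_crossBreeding pop reserve_pop fitness reserve_fitness out) := by unfold Spec_crossBreeding; infer_instance

-- ===== CLAIM (what is proved, stated in full; the proofs are below) =====
def Claim_equal_crossBreeding : Prop := ∀ (pop : List (List Int)) (reserve_pop : List (List Int)) (fitness : List Int) (reserve_fitness : List Int), Dom_crossBreeding pop reserve_pop fitness reserve_fitness → Pre_crossBreeding pop reserve_pop fitness reserve_fitness → Spec_crossBreeding pop reserve_pop fitness reserve_fitness (crossBreeding pop reserve_pop fitness reserve_fitness)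

-- ===== LEMMAS AND PROOFS =====

-- the insertion step of Python's stable sort with key = fst, reverse = True
def pvIns (y : Int × List Int) (S : List (Int × List Int)) : List (Int × List Int) :=
  PySem.List.insertBy (fun a b => decide (b.1 < a.1)) y S

-- the merge A's second loop performs: ties go to S (the reserve side)
def pvMerge : List (Int × List Int) → List (Int × List Int) → List (Int × List Int)
  | S, [] => S
  | [], u :: U => u :: pvMerge [] U
  | s :: S, u :: U => if u.1 > s.1 then u :: pvMerge (s :: S) U else s :: pvMerge S (u :: U)
termination_by S U => S.length + U.length

lemma pvMerge_nil_right (S : List (Int × List Int)) : pvMerge S [] = S := by cases S <;> simp [pvMerge]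

lemma pvMerge_nil_left (U : List (Int × List Int)) : pvMerge [] U = U := by
  induction U with
  | nil => simp [pvMerge]
  | cons u U ih => simp [pvMerge, ih]

lemma pvIns_nil (y : Int × List Int) : pvIns y [] = [y] := rfl

lemma pvIns_cons (y s : Int × List Int) (S : List (Int × List Int)) :
    pvIns y (s :: S) = if s.1 < y.1 then y :: s :: S else s :: pvIns y S := by
  simp [pvIns, PySem.List.insertBy]

lemma pvMerge_singleton (S : List (Int × List Int)) (y : Int × List Int) :
    pvMerge S [y] = pvIns y S := by
  induction S with
  | nil => simp [pvMerge_nil_left, pvIns_nil]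
  | cons s S ih =>
      rw [pvMerge, pvIns_cons]
      by_cases h : s.1 < y.1
      · simp [h, pvMerge_nil_right]
      · simp [h, ih]

-- inserting an element into a merge = merging with the element inserted on the right half
lemma pvIns_pvMerge (S U : List (Int × List Int)) (y : Int × List Int) :
    pvIns y (pvMerge S U) = pvMerge S (pvIns y U) := by
  induction S, U using pvMerge.induct with
  | case1 S => rw [pvMerge_nil_right, pvIns_nil, pvMerge_singleton]
  | case2 u U ih => rw [pvMerge_nil_left, pvMerge_nil_left]
  | case3 s S u U hgt ih =>
      rw [pvMerge, if_pos hgt, pvIns_cons, pvIns_cons]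
      by_cases h : u.1 < y.1
      · rw [if_pos h, if_pos h, pvMerge]
        have : y.1 > s.1 := by omega
        rw [if_pos this, pvMerge, if_pos hgt]
      · rw [if_neg h, if_neg h, pvMerge, if_pos hgt, ih]
  | case4 s S u U hle ih =>
      rw [pvMerge, if_neg hle, pvIns_cons]
      by_cases h : u.1 < y.1
      · rw [show pvIns y (u :: U) = y :: u :: U from by rw [pvIns_cons, if_pos h]]
        by_cases h2 : s.1 < y.1
        · rw [if_pos h2, pvMerge, if_pos (show y.1 > s.1 from h2), pvMerge, if_neg hle]
        · rw [if_neg h2, pvMerge, if_neg (show ¬ y.1 > s.1 from h2), ih, pvIns_cons, if_pos h]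
      · have hsy : ¬ s.1 < y.1 := by simp only [gt_iff_lt, not_lt] at hle h ⊢; omega
        rw [if_neg hsy, show pvIns y (u :: U) = u :: pvIns y U from by rw [pvIns_cons, if_neg h]]
        rw [pvMerge, if_neg hle, ih, pvIns_cons, if_neg h]

-- insertion-sorting ys on top of S = merging S with insertion-sorted ys
lemma foldl_pvIns (ys : List (Int × List Int)) (S : List (Int × List Int)) :
    ys.foldl (fun acc x => pvIns x acc) S = pvMerge S (ys.foldl (fun acc x => pvIns x acc) []) := by
  induction ys using List.reverseRecOn generalizing S with
  | nil => simp [pvMerge_nil_right]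
  | append_singleton ys y ih =>
      rw [List.foldl_append, List.foldl_append]
      simp only [List.foldl_cons, List.foldl_nil]
      rw [ih S, pvIns_pvMerge]

-- one stable reverse sort of the concatenation = merge of the two sorted halves
lemma sorted_append_eq_pvMerge (xs ys : List (Int × List Int)) :
    PySem.List.sorted (xs ++ ys) (fun t => t.1) true
      = pvMerge (PySem.List.sorted xs (fun t => t.1) true) (PySem.List.sorted ys (fun t => t.1) true) := by
  rw [PySem.List.sorted_rev_eq_foldl_insertBy, PySem.List.sorted_rev_eq_foldl_insertBy,
      PySem.List.sorted_rev_eq_foldl_insertBy, List.foldl_append]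
  exact foldl_pvIns ys _

lemma foldl_pair_append {α β γ : Type} (l : List α) (f : α → β) (g : α → γ) (a : List β) (b : List γ) :
    l.foldl (fun (st : List β × List γ) i => (st.1 ++ [f i], st.2 ++ [g i])) (a, b)
      = (a ++ l.map f, b ++ l.map g) := by
  induction l generalizing a b with
  | nil => simp
  | cons x l ih => simp [ih]

-- A's first loop builds exactly the two mapped-over-range lists
lemma crossBreedingBuild_eq (pop : List (List Int)) (reserve_pop : List (List Int)) (fitness : List Int) (reserve_fitness : List Int) :
    crossBreedingBuild pop reserve_pop fitness reserve_fitness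
      = ((PySem.List.pyRange 0 (pop.length : Int) 1).map (fun i => (PySem.List.pyGetD fitness i 0, PySem.List.pyGetD pop i [])),
         (PySem.List.pyRange 0 (pop.length : Int) 1).map (fun i => (PySem.List.pyGetD reserve_fitness i 0, PySem.List.pyGetD reserve_pop i []))) := by
  unfold crossBreedingBuild
  rw [foldl_pair_append]
  simp

lemma take_succ_set (pop : List (List Int)) (i : Nat) (v : List Int) (h : i < pop.length) :
    (pop.set i v).take (i+1) = pop.take i ++ [v] := by
  rw [List.set_eq_take_append_cons_drop, if_pos h, List.take_append]
  simp [List.length_take, Nat.min_eq_left (Nat.le_of_lt h), List.take_take]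

-- A's second loop writes out the first n elements of the merge
lemma crossBreedingLoop_eq (b1 b2 : List (Int × List Int)) (n : Nat) :
    ∀ (d j k : Nat) (pop : List (List Int)), j + k + d = n →
      b1.length = n → b2.length = n → pop.length = n →
      crossBreedingLoop b1 b2 n (j + k) j k pop
        = pop.take (j + k) ++ (((pvMerge (b2.drop k) (b1.drop j)).map (fun t => t.2)).take d) := by
  intro d
  induction d with
  | zero =>
      intro j k pop hjk hb1 hb2 hpop
      rw [crossBreedingLoop]
      simp only [Nat.add_zero] at hjk
      rw [dif_neg (by omega)]
      simp [hjk, ← hpop]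
  | succ d ih =>
      intro j k pop hjk hb1 hb2 hpop
      have hj : j < b1.length := by omega
      have hk : k < b2.length := by omega
      have hi : j + k < pop.length := by omega
      have hgj : PySem.List.pyGetD b1 (j : Int) (0, []) = b1[j] := by
        rw [PySem.List.pyGetD_natCast, List.getD_eq_getElem?_getD, List.getElem?_eq_getElem hj]; rfl
      have hgk : PySem.List.pyGetD b2 (k : Int) (0, []) = b2[k] := by
        rw [PySem.List.pyGetD_natCast, List.getD_eq_getElem?_getD, List.getElem?_eq_getElem hk]; rfl
      have hd1 : b1.drop j = b1[j] :: b1.drop (j+1) := List.drop_eq_getElem_cons hj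
      have hd2 : b2.drop k = b2[k] :: b2.drop (k+1) := List.drop_eq_getElem_cons hk
      rw [crossBreedingLoop, dif_pos (by omega : j + k < n), hgj, hgk]
      by_cases hcmp : (b1[j]).1 > (b2[k]).1
      · rw [if_pos hcmp]
        have := ih (j+1) k (pop.set (j+k) (b1[j]).2) (by omega) hb1 hb2 (by simp [hpop])
        have harg : j + 1 + k = j + k + 1 := by omega
        rw [harg] at this
        rw [take_succ_set _ _ _ hi] at this
        rw [this, hd2, hd1, pvMerge, if_pos hcmp]
        simp [List.take_succ_cons, List.append_assoc]
      · rw [if_neg hcmp]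
        have := ih j (k+1) (pop.set (j+k) (b2[k]).2) (by omega) hb1 hb2 (by simp [hpop])
        have harg : j + (k + 1) = j + k + 1 := by omega
        rw [harg] at this
        rw [take_succ_set _ _ _ hi] at this
        rw [this, hd2, hd1, pvMerge, if_neg hcmp, ← hd1]
        simp [List.take_succ_cons, List.append_assoc]

-- the two ports agree (unconditionally; Pre_ marks where the Pythons return at all)
lemma crossBreeding_eq_alt (pop : List (List Int)) (reserve_pop : List (List Int)) (fitness : List Int) (reserve_fitness : List Int) :
    crossBreeding pop reserve_pop fitness reserve_fitness = crossBreeding_alt pop reserve_pop fitness reserve_fitness := by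
  unfold crossBreeding crossBreeding_alt
  rw [crossBreedingBuild_eq]
  have hkey : pvFunc = (fun t : Int × List Int => t.1) := rfl
  rw [hkey]
  set f1 := (fun i => (PySem.List.pyGetD fitness i 0, PySem.List.pyGetD pop i [])) with hf1
  set f2 := (fun i => (PySem.List.pyGetD reserve_fitness i 0, PySem.List.pyGetD reserve_pop i [])) with hf2
  set R := PySem.List.pyRange 0 (pop.length : Int) 1 with hR
  have hlenR : R.length = pop.length := by
    rw [hR, PySem.List.length_pyRange_one]; omega
  have hb1 : (PySem.List.sorted (R.map f1) (fun t : Int × List Int => t.1) true).length = pop.length := by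
    rw [PySem.List.length_sorted, List.length_map, hlenR]
  have hb2 : (PySem.List.sorted (R.map f2) (fun t : Int × List Int => t.1) true).length = pop.length := by
    rw [PySem.List.length_sorted, List.length_map, hlenR]
  have hloop := crossBreedingLoop_eq
    (PySem.List.sorted (R.map f1) (fun t : Int × List Int => t.1) true)
    (PySem.List.sorted (R.map f2) (fun t : Int × List Int => t.1) true)
    pop.length pop.length 0 0 pop (by omega) hb1 hb2 rfl
  simp only [Nat.zero_add, List.drop_zero, List.take_zero, List.nil_append] at hloop
  rw [hloop]
  have hslice : ∀ (xs : List (Int × List Int)),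
      PySem.List.slice xs none (some ((pop.length : Int))) = xs.take pop.length := by
    intro xs
    rw [PySem.List.slice_to xs (by positivity), Int.toNat_natCast]
  simp only [sorted_append_eq_pvMerge, hslice, List.map_take]
  rw [← hR]

-- ===== VERDICT (by name: the statement is the Claim_ definition above) =====
theorem crossBreeding_spec : Claim_equal_crossBreeding := by
  intro pop reserve_pop fitness reserve_fitness _ _
  unfold Spec_crossBreeding
  exact crossBreeding_eq_alt pop reserve_pop fitness reserve_fitness
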